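-- pv_equiv track=rewrite | github.com/Robin-Amann/bachelor-thesis | code/tasks/switchboard_transcript_preprocessing/preprocessing.py | seperate_speaker
-- ===== SOURCE A (Python) =====
-- def seperate_speaker(ann_content) :
--     ann_content_temp = []
--     start = 0
--     while start < len(ann_content) :
--         end = start
--         while end < len(ann_content) and ann_content[end] != '' :
--             end += 1
--         ann_content_temp.append(ann_content[start:end])
--         start = end + 1
--     ann_A = [block[1:] for block in ann_content_temp if len(block) > 1 and 'SpeakerA' in block[0]]
--     ann_B = [block[1:] for block in ann_content_temp if len(block) > 1 and 'SpeakerB' in block[0]]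
--     # flatten lists
--     return [line for block in ann_A for line in block], [line for block in ann_B for line in block]
-- ===== SOURCE B (Python) =====
-- def seperate_speaker(ann_content):
--     # single-pass state machine over the lines instead of build-blocks/filter/flatten
--     res_A, res_B = [], []
--     expecting_header = True
--     is_A = is_B = False
--     for line in ann_content:
--         if line == '':
--             expecting_header = True
--         elif expecting_header:
--             is_A = 'SpeakerA' in line
--             is_B = 'SpeakerB' in line
--             expecting_header = False
--         else:
--             if is_A:
--                 res_A.append(line)
--             if is_B:
--                 res_B.append(line)
--     return res_A, res_B
-- ===== Notes on version B (the rewrite author's own statement) =====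
-- stated objective: simpler
-- what changed: Replaced the build-blocks-then-filter-twice-then-flatten pipeline with a single linear state-machine pass that routes each line to the A/B result lists via expecting_header/is_A/is_B flags.
import Mathlib
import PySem

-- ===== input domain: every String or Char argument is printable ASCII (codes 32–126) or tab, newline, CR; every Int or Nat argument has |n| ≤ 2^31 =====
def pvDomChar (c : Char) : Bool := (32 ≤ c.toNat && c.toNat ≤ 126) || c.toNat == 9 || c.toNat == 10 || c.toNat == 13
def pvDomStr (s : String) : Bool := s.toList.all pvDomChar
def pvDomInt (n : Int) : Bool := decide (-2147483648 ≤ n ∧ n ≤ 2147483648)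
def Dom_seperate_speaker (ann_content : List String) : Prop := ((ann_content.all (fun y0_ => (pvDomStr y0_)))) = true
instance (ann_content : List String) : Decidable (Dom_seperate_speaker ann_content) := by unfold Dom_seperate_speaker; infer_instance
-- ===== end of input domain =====

-- B is a single linear state-machine pass (expecting_header / is_A / is_B flags) instead of
-- A's build-blocks, filter twice, flatten pipeline; same return value, objective: simpler.

-- ===== PORT A =====
-- 'len(block) > 1 and "Speaker?" in block[0]' — the filter condition of A's two comprehensions
def ssPred (sp : String) (b : List String) : Bool :=
  decide (1 < b.length) && PySem.Str.isIn sp (b.headD "")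

-- outer while loop of A: the inner while advances end over the lines ≠ '' (= takeWhile),
-- the slice ann_content[start:end] is appended, and the loop continues at end+1
def ssBlocks (l : List String) : List (List String) :=
  match l with
  | [] => []
  | x :: xs =>
    let b := (x :: xs).takeWhile (fun s => s ≠ "")
    b :: ssBlocks ((x :: xs).drop (b.length + 1))
  termination_by l.length
  decreasing_by
    simp only [List.length_drop, List.length_cons]
    omega

def seperate_speaker (ann_content : List String) : List String × List String :=
  let ann_content_temp := ssBlocks ann_content
  let ann_A := (ann_content_temp.filter (fun b => ssPred "SpeakerA" b)).map (fun b => b.drop 1)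
  let ann_B := (ann_content_temp.filter (fun b => ssPred "SpeakerB" b)).map (fun b => b.drop 1)
  (ann_A.flatten, ann_B.flatten)

-- ===== PORT B =====
-- the for-loop of Source B, state = (expecting_header, is_A, is_B, res_A, res_B)
def ssLoop (exp isA isB : Bool) (resA resB : List String) : List String → List String × List String
  | [] => (resA, resB)
  | line :: rest =>
    if line = "" then ssLoop true isA isB resA resB rest
    else if exp then
      ssLoop false (PySem.Str.isIn "SpeakerA" line) (PySem.Str.isIn "SpeakerB" line) resA resB rest
    else
      ssLoop exp isA isB (if isA then resA ++ [line] else resA)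
        (if isB then resB ++ [line] else resB) rest

def seperate_speaker_alt (ann_content : List String) : List String × List String :=
  ssLoop true false false [] [] ann_content

-- ===== PRECONDITION & SPEC =====
def Spec_seperate_speaker (ann_content : List String) (out : List String × List String) : Prop := out = seperate_speaker_alt ann_content
instance (ann_content : List String) (out : List String × List String) : Decidable (Spec_seperate_speaker ann_content out) := by unfold Spec_seperate_speaker; infer_instance

-- ===== CLAIM (what is proved, stated in full; the proofs are below) =====
def Claim_equal_seperate_speaker : Prop := ∀ (ann_content : List String), Dom_seperate_speaker ann_content → Spec_seperate_speaker ann_content (seperate_speaker ann_content)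

-- ===== LEMMAS AND PROOFS =====

theorem ssBlocks_nil : ssBlocks [] = [] := by rw [ssBlocks]

theorem ssBlocks_cons (x : String) (xs : List String) :
    ssBlocks (x :: xs) =
      ((x :: xs).takeWhile (fun s => s ≠ "")) ::
        ssBlocks ((x :: xs).drop (((x :: xs).takeWhile (fun s => s ≠ "")).length + 1)) := by
  rw [ssBlocks]

-- flattened A-side / B-side output of a list of blocks (seperate_speaker = (ssFlat "SpeakerA" …, ssFlat "SpeakerB" …))
def ssFlat (sp : String) (blocks : List (List String)) : List String :=
  ((blocks.filter (fun b => ssPred sp b)).map (fun b => b.drop 1)).flatten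

theorem ssFlat_nil (sp : String) : ssFlat sp [] = [] := rfl

theorem ssFlat_cons (sp : String) (b : List String) (bs : List (List String)) :
    ssFlat sp (b :: bs) = (if ssPred sp b then b.drop 1 else []) ++ ssFlat sp bs := by
  simp only [ssFlat, List.filter_cons]
  by_cases h : ssPred sp b = true
  · simp [h]
  · simp [h]

theorem ssPred_cons_cons (sp h t : String) (ts : List String) :
    ssPred sp (h :: t :: ts) = PySem.Str.isIn sp h := by
  simp [ssPred]

theorem ssPred_single (sp h : String) : ssPred sp [h] = false := by
  simp [ssPred]

-- the two statements proved simultaneously by strong induction on length: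
-- (main) the loop in header-expecting state computes the block decomposition's flattening;
-- (tail) the loop in mid-block state with flags a,b consumes the current block's remaining lines
def ssMain (l : List String) : Prop :=
  ∀ (a b : Bool) (ra rb : List String),
    ssLoop true a b ra rb l =
      (ra ++ ssFlat "SpeakerA" (ssBlocks l), rb ++ ssFlat "SpeakerB" (ssBlocks l))

def ssTail (l : List String) : Prop :=
  ∀ (a b : Bool) (ra rb : List String),
    ssLoop false a b ra rb l =
      (ra ++ (if a then l.takeWhile (fun s => s ≠ "") else []) ++
         ssFlat "SpeakerA" (ssBlocks (l.drop ((l.takeWhile (fun s => s ≠ "")).length + 1))),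
       rb ++ (if b then l.takeWhile (fun s => s ≠ "") else []) ++
         ssFlat "SpeakerB" (ssBlocks (l.drop ((l.takeWhile (fun s => s ≠ "")).length + 1))))

theorem ss_both : ∀ (n : Nat) (l : List String), l.length ≤ n → ssMain l ∧ ssTail l := by
  intro n
  induction n with
  | zero =>
    intro l hl
    have : l = [] := List.eq_nil_of_length_eq_zero (Nat.le_zero.mp hl)
    subst this
    refine ⟨fun a b ra rb => ?_, fun a b ra rb => ?_⟩ <;>
      simp [ssLoop, ssBlocks_nil, ssFlat_nil]
  | succ n ih =>
    intro l hl
    match l with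
    | [] =>
      refine ⟨fun a b ra rb => ?_, fun a b ra rb => ?_⟩ <;>
        simp [ssLoop, ssBlocks_nil, ssFlat_nil]
    | line :: rest =>
      have hrest : rest.length ≤ n := by simpa using Nat.succ_le_succ_iff.mp hl
      constructor
      · -- ssMain
        intro a b ra rb
        by_cases he : line = ""
        · subst he
          rw [ssBlocks_cons]
          simp only [ssLoop]
          have htw : ("" :: rest).takeWhile (fun s => s ≠ "") = ([] : List String) := by
            simp [List.takeWhile]
          rw [htw, (ih rest hrest).1 a b ra rb]
          simp [ssFlat_cons, ssPred]
        · rw [ssBlocks_cons]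
          simp only [ssLoop, if_neg he]
          have htw : (line :: rest).takeWhile (fun s => s ≠ "") =
              line :: rest.takeWhile (fun s => s ≠ "") := by
            simp [List.takeWhile, he]
          rw [htw, (ih rest hrest).2 (PySem.Str.isIn "SpeakerA" line)
            (PySem.Str.isIn "SpeakerB" line) ra rb]
          simp only [List.length_cons, List.drop_succ_cons, ssFlat_cons, if_true, Prod.mk.injEq]
          constructor
          · cases htw2 : rest.takeWhile (fun s => s ≠ "") with
            | nil => simp [ssPred_single]
            | cons t ts => simp [ssPred_cons_cons]
          · cases htw2 : rest.takeWhile (fun s => s ≠ "") with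
            | nil => simp [ssPred_single]
            | cons t ts => simp [ssPred_cons_cons]
      · -- ssTail
        intro a b ra rb
        by_cases he : line = ""
        · subst he
          simp only [ssLoop]
          rw [(ih rest hrest).1 a b ra rb]
          simp [List.takeWhile]
        · simp only [ssLoop, if_neg he, Bool.false_eq_true, if_false]
          have htw : (line :: rest).takeWhile (fun s => s ≠ "") =
              line :: rest.takeWhile (fun s => s ≠ "") := by
            simp [List.takeWhile, he]
          rw [htw, (ih rest hrest).2 a b
            (if a then ra ++ [line] else ra) (if b then rb ++ [line] else rb)]
          simp only [List.length_cons, List.drop_succ_cons, Prod.mk.injEq]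
          constructor
          · cases a <;> simp
          · cases b <;> simp

-- ===== VERDICT (by name: the statement is the Claim_ definition above) =====
theorem seperate_speaker_spec : Claim_equal_seperate_speaker := by
  intro l _
  unfold Spec_seperate_speaker seperate_speaker seperate_speaker_alt
  rw [(ss_both l.length l le_rfl).1 false false [] []]
  simp [ssFlat]
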